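-- pv_equiv track=rewrite | github.com/ELCI-Linux/Marina | Joan/ascii_toolkit.py | _create_simple_banner
-- ===== SOURCE A (Python) =====
-- def _create_simple_banner(text: str, width: int = 80) -> str:
--     """Create simple ASCII banner without figlet"""
--     # Simple block letter patterns for common characters
--     patterns = {
--         'A': ["  ██  ", " ████ ", "██  ██", "██████", "██  ██"],
--         'B': ["██████", "██  ██", "██████", "██████", "██████"],
--         'C': [" █████", "██    ", "██    ", "██    ", " █████"],
--         'D': ["██████", "██  ██", "██  ██", "██  ██", "██████"],
--         'E': ["██████", "██    ", "█████ ", "██    ", "██████"],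
--         'F': ["██████", "██    ", "█████ ", "██    ", "██    "],
--         'G': [" █████", "██    ", "██ ███", "██  ██", " █████"],
--         'H': ["██  ██", "██  ██", "██████", "██  ██", "██  ██"],
--         'I': ["██████", "  ██  ", "  ██  ", "  ██  ", "██████"],
--         'J': ["██████", "    ██", "    ██", "██  ██", " █████"],
--         'O': [" █████", "██  ██", "██  ██", "██  ██", " █████"],
--         'N': ["██  ██", "███ ██", "██████", "██ ███", "██  ██"],
--         ' ': ["      ", "      ", "      ", "      ", "      "]
--     }
--
--     lines = ["", "", "", "", ""]
--     for char in text.upper():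
--         if char in patterns:
--             for i, pattern_line in enumerate(patterns[char]):
--                 lines[i] += pattern_line + " "
--         else:
--             # Unknown character - use placeholder
--             for i in range(5):
--                 lines[i] += "██████ "
--
--     return "\n".join(lines)
-- ===== SOURCE B (Python) =====
-- def _create_simple_banner(text: str, width: int = 80) -> str:
--     """Create simple ASCII banner without figlet"""
--     patterns = {
--         'A': ["  ██  ", " ████ ", "██  ██", "██████", "██  ██"],
--         'B': ["██████", "██  ██", "██████", "██████", "██████"],
--         'C': [" █████", "██    ", "██    ", "██    ", " █████"],
--         'D': ["██████", "██  ██", "██  ██", "██  ██", "██████"],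
--         'E': ["██████", "██    ", "█████ ", "██    ", "██████"],
--         'F': ["██████", "██    ", "█████ ", "██    ", "██    "],
--         'G': [" █████", "██    ", "██ ███", "██  ██", " █████"],
--         'H': ["██  ██", "██  ██", "██████", "██  ██", "██  ██"],
--         'I': ["██████", "  ██  ", "  ██  ", "  ██  ", "██████"],
--         'J': ["██████", "    ██", "    ██", "██  ██", " █████"],
--         'O': [" █████", "██  ██", "██  ██", "██  ██", " █████"],
--         'N': ["██  ██", "███ ██", "██████", "██ ███", "██  ██"],
--         ' ': ["      ", "      ", "      ", "      ", "      "]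
--     }
--     # Flatten every glyph into ONE 30-character string (5 rows x 6 cols);
--     # banner rows are then cut out of these flat strings by index arithmetic.
--     flat = {c: ''.join(rows) for c, rows in patterns.items()}
--     ph = '██████' * 5
--     up = text.upper()
--     out = []  # single flat output buffer; newlines are emitted explicitly
--     for i in range(5):
--         if i:
--             out.append('\n')
--         for ch in up:
--             g = flat.get(ch, ph)
--             out.append(g[6 * i:6 * i + 6] + ' ')
--     return ''.join(out)
-- ===== Notes on version B (the rewrite author's own statement) =====
-- stated objective: faster
-- what changed: B flattens each glyph into a single 30-character string and cuts the 6-character row cells out by index arithmetic (slicing), emitting everything into one flat buffer of tokens joined once at the end, instead of A's five lockstep row-accumulator strings grown by repeated += per character.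
import Mathlib
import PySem

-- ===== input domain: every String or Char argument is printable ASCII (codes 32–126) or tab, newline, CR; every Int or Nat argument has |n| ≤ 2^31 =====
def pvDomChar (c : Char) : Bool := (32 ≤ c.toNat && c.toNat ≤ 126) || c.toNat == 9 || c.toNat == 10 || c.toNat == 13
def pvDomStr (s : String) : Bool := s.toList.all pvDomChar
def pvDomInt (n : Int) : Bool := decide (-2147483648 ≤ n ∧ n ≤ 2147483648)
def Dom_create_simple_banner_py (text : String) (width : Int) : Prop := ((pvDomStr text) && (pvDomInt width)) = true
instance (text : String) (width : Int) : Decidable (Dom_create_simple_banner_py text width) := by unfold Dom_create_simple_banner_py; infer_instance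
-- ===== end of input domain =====

-- B flattens each glyph into one 30-character string and slices 6-character row cells out of it
-- by index arithmetic into a single flat output buffer, instead of A's five lockstep row accumulators.

-- the literal pattern dict both Python versions carry (insertion order preserved)
def bannerPatterns : PySem.Dict Char (List String) :=
  PySem.Dict.ofList
  [ ('A', ["  ██  ", " ████ ", "██  ██", "██████", "██  ██"]),
    ('B', ["██████", "██  ██", "██████", "██████", "██████"]),
    ('C', [" █████", "██    ", "██    ", "██    ", " █████"]),
    ('D', ["██████", "██  ██", "██  ██", "██  ██", "██████"]),
    ('E', ["██████", "██    ", "█████ ", "██    ", "██████"]),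
    ('F', ["██████", "██    ", "█████ ", "██    ", "██    "]),
    ('G', [" █████", "██    ", "██ ███", "██  ██", " █████"]),
    ('H', ["██  ██", "██  ██", "██████", "██  ██", "██  ██"]),
    ('I', ["██████", "  ██  ", "  ██  ", "  ██  ", "██████"]),
    ('J', ["██████", "    ██", "    ██", "██  ██", " █████"]),
    ('O', [" █████", "██  ██", "██  ██", "██  ██", " █████"]),
    ('N', ["██  ██", "███ ██", "██████", "██ ███", "██  ██"]),
    (' ', ["      ", "      ", "      ", "      ", "      "]) ]

-- ===== PORT A =====
-- one outer-loop step of A: append the character's pattern rows (or the placeholder) to the 5 lines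
def bannerStepA (lines : List String) (char : Char) : List String :=
  match PySem.Dict.get? bannerPatterns char with
  | some pat =>
      (PySem.List.enumerate pat 0).foldl
        (fun ls ip => ls.set ip.1.toNat ((ls.getD ip.1.toNat "") ++ (ip.2 ++ " "))) lines
  | none =>
      (PySem.List.pyRange 0 5 1).foldl
        (fun ls i => ls.set i.toNat ((ls.getD i.toNat "") ++ "██████ ")) lines

def create_simple_banner_py (text : String) (width : Int) : String :=
  let lines := ((PySem.Str.upper text).toList).foldl bannerStepA ["", "", "", "", ""]
  PySem.Str.join "\n" lines

-- ===== PORT B =====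
-- flat = {c: ''.join(rows) for c, rows in patterns.items()}
def bannerFlat : PySem.Dict Char String :=
  PySem.Dict.ofList ((PySem.Dict.items bannerPatterns).map (fun cv => (cv.1, PySem.Str.join "" cv.2)))

-- ph = '██████' * 5
def bannerPh : String := "██████████████████████████████"

def create_simple_banner_py_alt (text : String) (width : Int) : String :=
  let up := (PySem.Str.upper text).toList
  let out := (List.range 5).foldl (fun acc i =>
      let acc := if i ≠ 0 then acc ++ ["\n"] else acc
      up.foldl (fun acc ch =>
        let g := PySem.Dict.getD bannerFlat ch bannerPh
        acc ++ [PySem.Str.slice g (some ((6 * i : Nat) : Int)) (some ((6 * i + 6 : Nat) : Int)) ++ " "]) acc)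
    ([] : List String)
  PySem.Str.join "" out

-- ===== PRECONDITION & SPEC =====
def Spec_create_simple_banner_py (text : String) (width : Int) (out : String) : Prop := out = create_simple_banner_py_alt text width
instance (text : String) (width : Int) (out : String) : Decidable (Spec_create_simple_banner_py text width out) := by unfold Spec_create_simple_banner_py; infer_instance

-- ===== CLAIM (what is proved, stated in full; the proofs are below) =====
def Claim_equal_create_simple_banner_py : Prop := ∀ (text : String) (width : Int), Dom_create_simple_banner_py text width → Spec_create_simple_banner_py text width (create_simple_banner_py text width)

-- ===== LEMMAS AND PROOFS =====

def bannerPlaceholder : List String := ["██████", "██████", "██████", "██████", "██████"]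

-- row contribution of one character in row i (as A produces it)
def bannerCell (i : Nat) (ch : Char) : String :=
  (PySem.Dict.getD bannerPatterns ch bannerPlaceholder).getD i "" ++ " "

-- B's cell: a 6-char slice of the flattened glyph
def bannerCellB (i : Nat) (ch : Char) : String :=
  PySem.Str.slice (PySem.Dict.getD bannerFlat ch bannerPh) (some ((6 * i : Nat) : Int)) (some ((6 * i + 6 : Nat) : Int)) ++ " "

-- row i of the banner for a character list
def bannerRow (i : Nat) (cs : List Char) : String :=
  PySem.Str.join "" (cs.map (bannerCell i))

theorem join_empty_cons (x : String) (xs : List String) :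
    PySem.Str.join "" (x :: xs) = x ++ PySem.Str.join "" xs := by
  cases xs with
  | nil => simp [PySem.Str.join, PySem.Chars.join, List.intercalate]
  | cons y ys => simp [PySem.Str.join, PySem.Chars.join_cons_cons]

theorem bannerRow_nil (i : Nat) : bannerRow i [] = "" := by
  simp [bannerRow, PySem.Str.join, PySem.Chars.join, List.intercalate]

theorem bannerRow_cons (i : Nat) (c : Char) (cs : List Char) :
    bannerRow i (c :: cs) = bannerCell i c ++ bannerRow i cs := by
  simp [bannerRow, join_empty_cons]

-- one step of A appends exactly the five row cells of the character
theorem bannerStepA_eval (c : Char) (a b c' d e : String) :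
    bannerStepA [a, b, c', d, e] c =
      [a ++ bannerCell 0 c, b ++ bannerCell 1 c, c' ++ bannerCell 2 c,
       d ++ bannerCell 3 c, e ++ bannerCell 4 c] := by
  rcases eq_or_ne c 'A' with rfl | hA; · rfl
  rcases eq_or_ne c 'B' with rfl | hB; · rfl
  rcases eq_or_ne c 'C' with rfl | hC; · rfl
  rcases eq_or_ne c 'D' with rfl | hD; · rfl
  rcases eq_or_ne c 'E' with rfl | hE; · rfl
  rcases eq_or_ne c 'F' with rfl | hF; · rfl
  rcases eq_or_ne c 'G' with rfl | hG; · rfl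
  rcases eq_or_ne c 'H' with rfl | hH; · rfl
  rcases eq_or_ne c 'I' with rfl | hI; · rfl
  rcases eq_or_ne c 'J' with rfl | hJ; · rfl
  rcases eq_or_ne c 'O' with rfl | hO; · rfl
  rcases eq_or_ne c 'N' with rfl | hN; · rfl
  rcases eq_or_ne c ' ' with rfl | hS; · rfl
  have hnone : PySem.Dict.get? bannerPatterns c = none := by
    have hitems : bannerPatterns.items = [ ('A', ["  ██  ", " ████ ", "██  ██", "██████", "██  ██"]),
      ('B', ["██████", "██  ██", "██████", "██████", "██████"]),
      ('C', [" █████", "██    ", "██    ", "██    ", " █████"]),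
      ('D', ["██████", "██  ██", "██  ██", "██  ██", "██████"]),
      ('E', ["██████", "██    ", "█████ ", "██    ", "██████"]),
      ('F', ["██████", "██    ", "█████ ", "██    ", "██    "]),
      ('G', [" █████", "██    ", "██ ███", "██  ██", " █████"]),
      ('H', ["██  ██", "██  ██", "██████", "██  ██", "██  ██"]),
      ('I', ["██████", "  ██  ", "  ██  ", "  ██  ", "██████"]),
      ('J', ["██████", "    ██", "    ██", "██  ██", " █████"]),
      ('O', [" █████", "██  ██", "██  ██", "██  ██", " █████"]),
      ('N', ["██  ██", "███ ██", "██████", "██ ███", "██  ██"]),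
      (' ', ["      ", "      ", "      ", "      ", "      "]) ] := by decide
    simp [PySem.Dict.get?, hitems]
    exact ⟨hA.symm, hB.symm, hC.symm, hD.symm, hE.symm, hF.symm, hG.symm,
           hH.symm, hI.symm, hJ.symm, hO.symm, hN.symm, hS.symm⟩
  have hgetD : PySem.Dict.getD bannerPatterns c bannerPlaceholder = bannerPlaceholder := by
    simp [PySem.Dict.getD, hnone]
  have hrange : PySem.List.pyRange 0 5 1 = [0, 1, 2, 3, 4] := by decide
  have hlit : ("██████" ++ " " : String) = "██████ " := by decide
  unfold bannerStepA
  rw [hnone, hrange]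
  simp only [bannerCell, hgetD]
  simp [bannerPlaceholder, hlit]

-- A's outer fold, from any 5 accumulators, appends the five rows
theorem foldA_eval (cs : List Char) (a b c' d e : String) :
    cs.foldl bannerStepA [a, b, c', d, e] =
      [a ++ bannerRow 0 cs, b ++ bannerRow 1 cs, c' ++ bannerRow 2 cs,
       d ++ bannerRow 3 cs, e ++ bannerRow 4 cs] := by
  induction cs generalizing a b c' d e with
  | nil => simp [bannerRow_nil]
  | cons x xs ih =>
      simp only [List.foldl_cons, bannerStepA_eval, ih, bannerRow_cons]
      simp [String.append_assoc]

-- B's slice of the flat glyph is exactly A's row cell, for every row 0..4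
theorem cellB_eq : ∀ (ch : Char) (i : Nat), i < 5 → bannerCellB i ch = bannerCell i ch := by
  intro ch
  rcases eq_or_ne ch 'A' with rfl | hA; · decide
  rcases eq_or_ne ch 'B' with rfl | hB; · decide
  rcases eq_or_ne ch 'C' with rfl | hC; · decide
  rcases eq_or_ne ch 'D' with rfl | hD; · decide
  rcases eq_or_ne ch 'E' with rfl | hE; · decide
  rcases eq_or_ne ch 'F' with rfl | hF; · decide
  rcases eq_or_ne ch 'G' with rfl | hG; · decide
  rcases eq_or_ne ch 'H' with rfl | hH; · decide
  rcases eq_or_ne ch 'I' with rfl | hI; · decide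
  rcases eq_or_ne ch 'J' with rfl | hJ; · decide
  rcases eq_or_ne ch 'O' with rfl | hO; · decide
  rcases eq_or_ne ch 'N' with rfl | hN; · decide
  rcases eq_or_ne ch ' ' with rfl | hS; · decide
  have hnoneP : PySem.Dict.get? bannerPatterns ch = none := by
    have hitems : bannerPatterns.items = [ ('A', ["  ██  ", " ████ ", "██  ██", "██████", "██  ██"]),
      ('B', ["██████", "██  ██", "██████", "██████", "██████"]),
      ('C', [" █████", "██    ", "██    ", "██    ", " █████"]),
      ('D', ["██████", "██  ██", "██  ██", "██  ██", "██████"]),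
      ('E', ["██████", "██    ", "█████ ", "██    ", "██████"]),
      ('F', ["██████", "██    ", "█████ ", "██    ", "██    "]),
      ('G', [" █████", "██    ", "██ ███", "██  ██", " █████"]),
      ('H', ["██  ██", "██  ██", "██████", "██  ██", "██  ██"]),
      ('I', ["██████", "  ██  ", "  ██  ", "  ██  ", "██████"]),
      ('J', ["██████", "    ██", "    ██", "██  ██", " █████"]),
      ('O', [" █████", "██  ██", "██  ██", "██  ██", " █████"]),
      ('N', ["██  ██", "███ ██", "██████", "██ ███", "██  ██"]),
      (' ', ["      ", "      ", "      ", "      ", "      "]) ] := by decide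
    simp [PySem.Dict.get?, hitems]
    exact ⟨hA.symm, hB.symm, hC.symm, hD.symm, hE.symm, hF.symm, hG.symm,
           hH.symm, hI.symm, hJ.symm, hO.symm, hN.symm, hS.symm⟩
  have hnoneF : PySem.Dict.get? bannerFlat ch = none := by
    have hitems : bannerFlat.items = [ ('A', "  ██   ████ ██  ██████████  ██"),
      ('B', "████████  ████████████████████"),
      ('C', " ███████    ██    ██     █████"),
      ('D', "████████  ████  ████  ████████"),
      ('E', "████████    █████ ██    ██████"),
      ('F', "████████    █████ ██    ██    "),
      ('G', " ███████    ██ █████  ██ █████"),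
      ('H', "██  ████  ██████████  ████  ██"),
      ('I', "██████  ██    ██    ██  ██████"),
      ('J', "██████    ██    ████  ██ █████"),
      ('O', " ███████  ████  ████  ██ █████"),
      ('N', "██  █████ ██████████ █████  ██"),
      (' ', "                              ") ] := by decide
    simp [PySem.Dict.get?, hitems]
    exact ⟨hA.symm, hB.symm, hC.symm, hD.symm, hE.symm, hF.symm, hG.symm,
           hH.symm, hI.symm, hJ.symm, hO.symm, hN.symm, hS.symm⟩
  intro i hi
  unfold bannerCellB bannerCell
  rw [show PySem.Dict.getD bannerFlat ch bannerPh = bannerPh by simp [PySem.Dict.getD, hnoneF],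
      show PySem.Dict.getD bannerPatterns ch bannerPlaceholder = bannerPlaceholder by
        simp [PySem.Dict.getD, hnoneP]]
  revert i hi
  decide

-- a fold appending one element per item is append-of-map
theorem foldl_append_map {α : Type} (f : α → String) :
    ∀ (l : List α) (acc : List String),
      l.foldl (fun a x => a ++ [f x]) acc = acc ++ l.map f := by
  intro l
  induction l with
  | nil => simp
  | cons x xs ih => intro acc; simp [ih]

theorem join_empty_append (l1 l2 : List String) :
    PySem.Str.join "" (l1 ++ l2) = PySem.Str.join "" l1 ++ PySem.Str.join "" l2 := by
  induction l1 with
  | nil => simp [PySem.Str.join, PySem.Chars.join, List.intercalate]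
  | cons x xs ih => simp [join_empty_cons, ih, String.append_assoc]

theorem join5 (a b c d e : String) :
    PySem.Str.join "\n" [a, b, c, d, e] =
      a ++ "\n" ++ b ++ "\n" ++ c ++ "\n" ++ d ++ "\n" ++ e := by
  apply String.ext
  simp [PySem.Str.toList_join, PySem.Chars.join_cons_cons, PySem.Chars.join_singleton]

-- ===== VERDICT (by name: the statement is the Claim_ definition above) =====
theorem create_simple_banner_py_spec : Claim_equal_create_simple_banner_py := by
  intro text width _
  unfold Spec_create_simple_banner_py create_simple_banner_py create_simple_banner_py_alt
  have hcell : ∀ i : Nat, i < 5 →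
      (fun ch => PySem.Str.slice (PySem.Dict.getD bannerFlat ch bannerPh)
        (some ((6 * i : Nat) : Int)) (some ((6 * i + 6 : Nat) : Int)) ++ " ")
      = bannerCell i := by
    intro i hi; funext ch
    have := cellB_eq ch i hi
    simpa [bannerCellB] using this
  have hrange : List.range 5 = [0, 1, 2, 3, 4] := by decide
  have hnl : PySem.Str.join "" ["\n"] = "\n" := by decide
  simp only [foldA_eval, join5, hrange, List.foldl_cons, List.foldl_nil]
  simp only [foldl_append_map]
  rw [hcell 0 (by omega), hcell 1 (by omega), hcell 2 (by omega), hcell 3 (by omega),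
      hcell 4 (by omega)]
  simp only [ne_eq, one_ne_zero, OfNat.ofNat_ne_zero, not_true_eq_false, not_false_eq_true,
    if_true, if_false, List.nil_append]
  simp only [join_empty_append, hnl, bannerRow]
  have hemp : ∀ s : String, "" ++ s = s := fun s => by apply String.ext; simp
  simp [hemp, String.append_assoc]
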